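-- pv_equiv track=rewrite | github.com/ArhipBorisyuk/PAS_solver | moduli.py | create_matrix_Y
-- ===== SOURCE A (Python) =====
-- def create_matrix_Y(tasks_files, partition):
--     all_files = sorted({f for files in tasks_files.values() for f in files})
--     file_index = {f: i for i, f in enumerate(all_files)}
--     Y = [[0]*len(partition) for _ in all_files]
--     for j, module in enumerate(partition):
--         module_files = set()
--         for task in module:
--             module_files |= tasks_files.get(task, set())
--         for f in module_files:
--             Y[file_index[f]][j] = 1
--     return Y, all_files
-- ===== SOURCE B (Python) =====
-- # Different decomposition: invert the data twice -- a task->module-indices map,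
-- # then one pass over tasks_files building a file->module-index set (inverted
-- # index); rows are read off range(len(partition)) against those column sets.
-- # A instead unions per-module file sets and scatters 1s into a zero matrix.
--
-- def create_matrix_Y(tasks_files, partition):
--     all_files = sorted({f for files in tasks_files.values() for f in files})
--     task_mods = {}
--     for j, module in enumerate(partition):
--         for task in module:
--             task_mods.setdefault(task, []).append(j)
--     cols = {f: set() for f in all_files}
--     for task, files in tasks_files.items():
--         for f in files:
--             cols[f].update(task_mods.get(task, ()))
--     m = len(partition)
--     Y = [[1 if j in cols[f] else 0 for j in range(m)] for f in all_files]
--     return Y, all_files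
-- ===== Notes on version B (the rewrite author's own statement) =====
-- stated objective: alternative
-- what changed: B inverts the data instead of scattering: it builds a task->module-indices map and then, in one pass over tasks_files, a file->module-index set per file (an inverted column index), reading each row off range(len(partition)); A unions per-module file sets and marks 1s into a pre-zeroed matrix through a file_index dict.
import Mathlib
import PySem

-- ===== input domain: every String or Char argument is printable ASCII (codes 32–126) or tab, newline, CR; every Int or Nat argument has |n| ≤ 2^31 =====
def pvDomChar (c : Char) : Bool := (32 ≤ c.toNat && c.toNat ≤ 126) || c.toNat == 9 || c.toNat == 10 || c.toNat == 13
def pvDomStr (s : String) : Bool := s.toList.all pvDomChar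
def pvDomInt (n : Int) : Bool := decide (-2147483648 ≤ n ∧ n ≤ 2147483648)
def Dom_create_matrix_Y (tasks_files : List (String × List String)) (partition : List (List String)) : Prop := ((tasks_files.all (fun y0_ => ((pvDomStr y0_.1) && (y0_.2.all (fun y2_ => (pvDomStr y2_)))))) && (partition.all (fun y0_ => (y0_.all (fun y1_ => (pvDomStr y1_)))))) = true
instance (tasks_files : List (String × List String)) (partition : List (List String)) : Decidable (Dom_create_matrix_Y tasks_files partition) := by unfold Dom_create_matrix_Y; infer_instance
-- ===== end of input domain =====

-- B inverts the data instead of scattering: first a task -> module-indices map, then one pass over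
-- tasks_files building a file -> module-index set (an inverted column index), and rows are read off
-- range(len(partition)) against those sets; A unions per-module file sets and marks 1s into a
-- pre-zeroed matrix through a file_index dict (objective: alternative).
-- tasks_files is a Python dict[str, set[str]]: modelled with PySem.Dict.ofList (duplicate keys:
-- last value wins, key keeps its first position), set values as their distinct-element lists.
-- A's 'for f in module_files' iterates a Python set; the matrix it produces is independent of that
-- iteration order (each f marks its own cell once), so the port iterates the PySem.Set in order.
-- B's 'cols[f].update(...)' consumes its sets by membership only, which is order-independent.

-- ===== PORT A =====
def create_matrix_Y (tasks_files : List (String × List String)) (partition : List (List String)) : List (List Int) × List String :=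
  let d := PySem.Dict.ofList tasks_files
  let all_files := PySem.List.sorted (PySem.Set.ofList (d.values.flatMap (fun fs => fs))) (fun x => x) false
  let file_index := PySem.Dict.ofList ((PySem.List.enumerate all_files 0).map (fun q => (q.2, q.1)))
  let Y0 : List (List Int) := all_files.map (fun _ => List.replicate partition.length (0 : Int))
  let Y := (PySem.List.enumerate partition 0).foldl (fun Y jm =>
      let module_files : PySem.Set String :=
        jm.2.foldl (fun s task => PySem.Set.union s (d.getD task [])) PySem.Set.empty
      module_files.foldl (fun Y f =>
          let i := file_index.getD f 0
          PySem.List.pySetD Y i (PySem.List.pySetD (PySem.List.pyGetD Y i []) jm.1 1)) Y) Y0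
  (Y, all_files)

-- ===== PORT B =====
def create_matrix_Y_alt (tasks_files : List (String × List String)) (partition : List (List String)) : List (List Int) × List String :=
  let d := PySem.Dict.ofList tasks_files
  let all_files := PySem.List.sorted (PySem.Set.ofList (d.values.flatMap (fun fs => fs))) (fun x => x) false
  -- task_mods[task] = indices of the modules containing task (setdefault(task, []).append(j))
  let task_mods : PySem.Dict String (List Int) :=
    (PySem.List.enumerate partition 0).foldl (fun tm jm =>
      jm.2.foldl (fun tm task => tm.modify task [] (fun l => l ++ [jm.1])) tm) PySem.Dict.empty
  -- cols[f] = set of module indices covering f, one pass over tasks_files.items()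
  let cols0 : PySem.Dict String (PySem.Set Int) :=
    all_files.foldl (fun c f => c.insert f PySem.Set.empty) PySem.Dict.empty
  let cols := d.items.foldl (fun c tf =>
      tf.2.foldl (fun c f => c.modify f PySem.Set.empty (fun s => PySem.Set.update s (task_mods.getD tf.1 []))) c) cols0
  let m : Int := partition.length
  let Y := all_files.map (fun f =>
      (PySem.List.pyRange 0 m 1).map (fun j =>
        if PySem.Set.contains (cols.getD f PySem.Set.empty) j then (1 : Int) else 0))
  (Y, all_files)

-- ===== PRECONDITION & SPEC =====
def Spec_create_matrix_Y (tasks_files : List (String × List String)) (partition : List (List String)) (out : List (List Int) × List String) : Prop := out = create_matrix_Y_alt tasks_files partition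
instance (tasks_files : List (String × List String)) (partition : List (List String)) (out : List (List Int) × List String) : Decidable (Spec_create_matrix_Y tasks_files partition out) := by unfold Spec_create_matrix_Y; infer_instance

-- ===== CLAIM (what is proved, stated in full; the proofs are below) =====
def Claim_equal_create_matrix_Y : Prop := ∀ (tasks_files : List (String × List String)) (partition : List (List String)), Dom_create_matrix_Y tasks_files partition → Spec_create_matrix_Y tasks_files partition (create_matrix_Y tasks_files partition)

-- ===== LEMMAS AND PROOFS =====

-- ---- shared: per-module file set (the mathematical object both sides realise) ----
def pvMset (d : PySem.Dict String (List String)) (m : List String) : PySem.Set String :=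
  m.foldl (fun s task => PySem.Set.union s (PySem.Dict.getD d task [])) PySem.Set.empty

lemma pvMset_mem_aux (d : PySem.Dict String (List String)) (m : List String) (s : PySem.Set String) (f : String) :
    f ∈ m.foldl (fun s task => PySem.Set.union s (PySem.Dict.getD d task [])) s ↔
      f ∈ s ∨ ∃ t ∈ m, f ∈ PySem.Dict.getD d t [] := by
  induction m generalizing s with
  | nil => simp
  | cons t m ih => simp [ih, PySem.Set.mem_union, or_assoc]

lemma pvMset_mem (d : PySem.Dict String (List String)) (m : List String) (f : String) :
    f ∈ pvMset d m ↔ ∃ t ∈ m, f ∈ PySem.Dict.getD d t [] := by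
  simpa [pvMset] using pvMset_mem_aux d m PySem.Set.empty f

lemma pv_mem_values_of_getD (d : PySem.Dict String (List String)) (t f : String)
    (h : f ∈ PySem.Dict.getD d t []) : f ∈ d.values.flatMap (fun fs => fs) := by
  rcases hg : d.get? t with _ | v
  · rw [PySem.Dict.getD_of_get?_eq_none _ _ hg] at h; simp at h
  · rw [PySem.Dict.getD_of_get?_eq_some _ _ hg] at h
    have hit := PySem.Dict.mem_items_of_get?_eq_some (d := d) hg
    have hv : v ∈ d.values := by
      simp only [PySem.Dict.values]
      exact List.mem_map.mpr ⟨(t, v), hit, rfl⟩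
    exact List.mem_flatMap.mpr ⟨v, hv, h⟩

-- ---- A side: the scatter loop produces the indicator matrix ----
lemma pvInner (L : List String) (hL : L.Nodup) (g : String → Int)
    (hg : ∀ f ∈ L, g f = (L.idxOf f : Int)) (j : Int) (hj : 0 ≤ j)
    (s : List String) (hs : ∀ f ∈ s, f ∈ L) :
    ∀ (Y : List (List Int)), Y.length = L.length →
      (s.foldl (fun Y f => PySem.List.pySetD Y (g f) (PySem.List.pySetD (PySem.List.pyGetD Y (g f) []) j 1)) Y).length = L.length ∧
      ∀ i : Nat,
        (s.foldl (fun Y f => PySem.List.pySetD Y (g f) (PySem.List.pySetD (PySem.List.pyGetD Y (g f) []) j 1)) Y)[i]? =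
          if i < L.length ∧ L.getD i "" ∈ s then some (PySem.List.pySetD (Y.getD i []) j 1) else Y[i]? := by
  induction s with
  | nil =>
    intro Y hlen
    simp [hlen]
  | cons f s ih =>
    intro Y hlen
    have hfL : f ∈ L := hs f (List.mem_cons_self ..)
    have hs' : ∀ x ∈ s, x ∈ L := fun x hx => hs x (List.mem_cons_of_mem _ hx)
    have hn : L.idxOf f < L.length := List.idxOf_lt_length_of_mem hfL
    have hgf : g f = ((L.idxOf f : Nat) : Int) := hg f hfL
    set n := L.idxOf f with hndef
    have hstep : (fun Y f => PySem.List.pySetD Y (g f) (PySem.List.pySetD (PySem.List.pyGetD Y (g f) []) j 1)) Y f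
        = Y.set n (PySem.List.pySetD (Y.getD n []) j 1) := by
      simp [hgf, PySem.List.pySetD_natCast, PySem.List.pyGetD_natCast]
    simp only [List.foldl_cons, hstep]
    set P := PySem.List.pySetD (Y.getD n []) j 1 with hP
    set Y' := Y.set n P with hY'
    have hlen' : Y'.length = L.length := by simp [hY', hlen]
    obtain ⟨ihlen, ihget⟩ := ih hs' Y' hlen'
    refine ⟨ihlen, fun i => ?_⟩
    rw [ihget i]
    have hYi' : Y'[i]? = if n = i then (if n < Y.length then some P else none) else Y[i]? := List.getElem?_set
    by_cases hc : i < L.length ∧ L.getD i "" ∈ s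
    · have hcc : i < L.length ∧ L.getD i "" ∈ f :: s := ⟨hc.1, List.mem_cons_of_mem _ hc.2⟩
      rw [if_pos hc, if_pos hcc]
      by_cases hni : n = i
      · have hnY : n < Y.length := by omega
        have hgd : Y'.getD i [] = P := by
          rw [List.getD_eq_getElem?_getD, hYi', if_pos hni, if_pos hnY]
          rfl
        simp only [hgd, hP, hni, PySem.List.pySetD_of_nonneg _ _ hj, List.set_set]
      · have hgd : Y'.getD i [] = Y.getD i [] := by
          simp [List.getD_eq_getElem?_getD, hYi', hni]
        rw [hgd]
    · rw [if_neg hc]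
      by_cases hfi : i < L.length ∧ L.getD i "" = f
      · have hLi : L[i] = f := ((List.getD_eq_getElem L "" hfi.1).symm).trans hfi.2
        have hni : n = i := by rw [hndef, ← hLi]; exact hL.idxOf_getElem i hfi.1
        have hcc : i < L.length ∧ L.getD i "" ∈ f :: s := ⟨hfi.1, by rw [hfi.2]; exact List.mem_cons_self ..⟩
        rw [if_pos hcc, hYi', if_pos hni, if_pos (by omega : n < Y.length), hP, hni]
      · have hcc : ¬(i < L.length ∧ L.getD i "" ∈ f :: s) := by
          rintro ⟨h1, h2⟩
          rcases List.mem_cons.mp h2 with h | h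
          · exact hfi ⟨h1, h⟩
          · exact hc ⟨h1, h⟩
        rw [if_neg hcc]
        by_cases hni : n = i
        · exfalso
          apply hfi
          refine ⟨by omega, ?_⟩
          rw [← hni, List.getD_eq_getElem L "" hn]
          exact List.getElem_idxOf hn
        · rw [hYi', if_neg hni]

lemma pvOuter (L : List String) (hL : L.Nodup) (g : String → Int)
    (hg : ∀ f ∈ L, g f = (L.idxOf f : Int)) (d : PySem.Dict String (List String))
    (hsub : ∀ m f, f ∈ pvMset d m → f ∈ L) :
    ∀ (ms : List (List String)) (a : Int), 0 ≤ a → ∀ (Y : List (List Int)), Y.length = L.length →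
      ((PySem.List.enumerate ms a).foldl (fun Y jm =>
          (pvMset d jm.2).foldl (fun Y f => PySem.List.pySetD Y (g f) (PySem.List.pySetD (PySem.List.pyGetD Y (g f) []) jm.1 1)) Y) Y).length = L.length ∧
      ∀ i : Nat, i < L.length →
        ((PySem.List.enumerate ms a).foldl (fun Y jm =>
            (pvMset d jm.2).foldl (fun Y f => PySem.List.pySetD Y (g f) (PySem.List.pySetD (PySem.List.pyGetD Y (g f) []) jm.1 1)) Y) Y)[i]? =
          some ((PySem.List.enumerate ms a).foldl (fun row jm =>
            if L.getD i "" ∈ pvMset d jm.2 then PySem.List.pySetD row jm.1 1 else row) (Y.getD i [])) := by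
  intro ms
  induction ms with
  | nil =>
    intro a ha Y hlen
    refine ⟨by simpa [PySem.List.enumerate] using hlen, fun i hi => ?_⟩
    simp only [PySem.List.enumerate, List.foldl_nil]
    rw [List.getD_eq_getElem?_getD]
    cases h : Y[i]? with
    | none => exact absurd (List.getElem?_eq_none_iff.mp h) (by omega)
    | some r => simp
  | cons m ms ih =>
    intro a ha Y hlen
    rw [PySem.List.enumerate_cons]
    simp only [List.foldl_cons]
    obtain ⟨h1len, h1get⟩ := pvInner L hL g hg a ha (pvMset d m) (hsub m) Y hlen
    obtain ⟨ihlen, ihget⟩ := ih (a + 1) (by omega) _ h1len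
    refine ⟨ihlen, fun i hi => ?_⟩
    rw [ihget i hi]
    congr 1
    have : (List.foldl (fun Y f => PySem.List.pySetD Y (g f) (PySem.List.pySetD (PySem.List.pyGetD Y (g f) []) a 1)) Y (pvMset d m)).getD i []
        = (if L.getD i "" ∈ pvMset d m then PySem.List.pySetD (Y.getD i []) a 1 else Y.getD i []) := by
      rw [List.getD_eq_getElem?_getD, h1get i]
      by_cases hm : L.getD i "" ∈ pvMset d m
      · rw [if_pos ⟨hi, hm⟩, if_pos hm]; rfl
      · rw [if_neg (by tauto), if_neg hm, ← List.getD_eq_getElem?_getD]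
    rw [this]

lemma pvRow (d : PySem.Dict String (List String)) (f : String) :
    ∀ (ms : List (List String)) (a : Nat) (row : List Int), row.length = a + ms.length →
      (∀ q : Nat, a ≤ q → q < row.length → row[q]? = some 0) →
      (PySem.List.enumerate ms (a : Int)).foldl (fun row jm =>
          if f ∈ pvMset d jm.2 then PySem.List.pySetD row jm.1 1 else row) row =
        row.take a ++ ms.map (fun m => if f ∈ pvMset d m then (1 : Int) else 0) := by
  intro ms
  induction ms with
  | nil =>
    intro a row hrow _
    simp only [PySem.List.enumerate, List.foldl_nil, List.map_nil, List.append_nil]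
    simp only [List.length_nil] at hrow
    rw [List.take_of_length_le (by omega)]
  | cons m ms ih =>
    intro a row hrow hpre
    rw [PySem.List.enumerate_cons]
    simp only [List.foldl_cons]
    have ha : a < row.length := by simp at hrow; omega
    set row' := (if f ∈ pvMset d m then PySem.List.pySetD row (a : Int) 1 else row) with hrow'
    have hset : row' = if f ∈ pvMset d m then row.set a 1 else row := by
      rw [hrow', PySem.List.pySetD_natCast]
    have hlen' : row'.length = (a + 1) + ms.length := by
      rw [hset]; split <;> simp at hrow ⊢ <;> omega
    have hpre' : ∀ q : Nat, a + 1 ≤ q → q < row'.length → row'[q]? = some 0 := by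
      intro q hq hq'
      rw [hset] at hq' ⊢
      split at hq' <;> rename_i hmem
      · rw [if_pos hmem, List.getElem?_set, if_neg (by omega)]
        exact hpre q (by omega) (by simpa using hq')
      · rw [if_neg hmem]; exact hpre q (by omega) hq'
    have hcast : ((a : Int) + 1) = ((a + 1 : Nat) : Int) := by push_cast; ring
    rw [hcast, ih (a + 1) row' hlen' hpre']
    rw [List.map_cons]
    have htake : row'.take (a + 1) = row.take a ++ [if f ∈ pvMset d m then (1 : Int) else 0] := by
      rw [List.take_add_one]
      have h1 : row'.take a = row.take a := by
        rw [hset]; split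
        · rw [List.take_set, List.set_eq_of_length_le (by simp)]
        · rfl
      have h2 : row'[a]? = some (if f ∈ pvMset d m then (1 : Int) else 0) := by
        rw [hset]; split <;> rename_i hmem
        · rw [List.getElem?_set, if_pos rfl, if_pos ha]
        · exact hpre a le_rfl ha
      rw [h1, h2]
      rfl
    rw [htake, List.append_assoc]
    rfl

lemma pvFidx_getD (L : List String) (hL : L.Nodup) (i : Nat) (hi : i < L.length) :
    (PySem.Dict.ofList ((PySem.List.enumerate L 0).map (fun p => (p.2, p.1)))).getD L[i] 0 = (i : Int) := by
  set prs := (PySem.List.enumerate L 0).map (fun p => (p.2, p.1)) with hprs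
  have hfold : PySem.Dict.ofList prs = prs.foldl (fun d p => d.insert p.1 p.2) PySem.Dict.empty := rfl
  have hkeys : prs.map Prod.fst = L := by
    rw [hprs, List.map_map]
    exact PySem.List.map_snd_enumerate L 0
  have hitems : (PySem.Dict.ofList prs).items = prs := by
    rw [hfold]
    have := PySem.Dict.items_foldl_insert_fresh prs Prod.fst Prod.snd PySem.Dict.empty
      (by intro a _; simp [PySem.Dict.contains_empty]) (by rw [hkeys]; exact hL)
    simpa using this
  have hmem : (L[i], (i : Int)) ∈ prs := by
    rw [hprs]
    refine List.mem_map.mpr ⟨((i : Int), L[i]), ?_, rfl⟩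
    exact (PySem.List.mem_enumerate_iff L 0 _).mpr ⟨i, hi, by simp⟩
  exact PySem.Dict.getD_of_mem_items _ (by rw [hitems]; exact hmem)
    (PySem.Dict.nodup_keys_ofList prs) 0

-- A's fold equals the indicator matrix over the sorted file list
lemma pvMainA (d : PySem.Dict String (List String)) (p : List (List String)) :
    ((PySem.List.enumerate p 0).foldl (fun Y jm =>
        (jm.2.foldl (fun s task => PySem.Set.union s (PySem.Dict.getD d task [])) PySem.Set.empty).foldl
          (fun Y f =>
            PySem.List.pySetD Y
              (PySem.Dict.getD (PySem.Dict.ofList ((PySem.List.enumerate (PySem.List.sorted (PySem.Set.ofList (d.values.flatMap (fun fs => fs))) (fun x => x) false) 0).map (fun q => (q.2, q.1)))) f 0)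
              (PySem.List.pySetD
                (PySem.List.pyGetD Y
                  (PySem.Dict.getD (PySem.Dict.ofList ((PySem.List.enumerate (PySem.List.sorted (PySem.Set.ofList (d.values.flatMap (fun fs => fs))) (fun x => x) false) 0).map (fun q => (q.2, q.1)))) f 0)
                  [])
                jm.1 1)) Y)
      ((PySem.List.sorted (PySem.Set.ofList (d.values.flatMap (fun fs => fs))) (fun x => x) false).map (fun _ => List.replicate p.length (0 : Int))))
    = (PySem.List.sorted (PySem.Set.ofList (d.values.flatMap (fun fs => fs))) (fun x => x) false).map
        (fun f => p.map (fun m => if f ∈ pvMset d m then (1 : Int) else 0)) := by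
  set L := PySem.List.sorted (PySem.Set.ofList (d.values.flatMap (fun fs => fs))) (fun x => x) false with hLdef
  set fidx := PySem.Dict.ofList ((PySem.List.enumerate L 0).map (fun q => (q.2, q.1))) with hfidxdef
  have hL : L.Nodup := (PySem.List.sorted_perm _ _ _).symm.nodup (PySem.Set.nodup_ofList _)
  have hg : ∀ f ∈ L, fidx.getD f 0 = (L.idxOf f : Int) := by
    intro f hf
    have hlt := List.idxOf_lt_length_of_mem hf
    have := pvFidx_getD L hL (L.idxOf f) hlt
    rwa [List.getElem_idxOf hlt] at this
  have hsub : ∀ m f, f ∈ pvMset d m → f ∈ L := by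
    intro m f hf
    rcases (pvMset_mem d m f).mp hf with ⟨t, ht, hft⟩
    rw [hLdef, PySem.List.mem_sorted, PySem.Set.mem_ofList]
    exact pv_mem_values_of_getD d t f hft
  have hY0len : (L.map (fun _ => List.replicate p.length (0 : Int))).length = L.length := by simp
  have houter := pvOuter L hL (fun f => fidx.getD f 0) hg d hsub p 0 le_rfl
    (L.map (fun _ => List.replicate p.length (0 : Int))) hY0len
  simp only [pvMset] at houter
  apply List.ext_getElem?
  intro i
  by_cases hi : i < L.length
  · rw [houter.2 i hi]
    have hY0 : ((L.map (fun _ => List.replicate p.length (0 : Int))).getD i []) = List.replicate p.length 0 := by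
      rw [List.getD_eq_getElem _ _ (by simpa using hi)]
      simp
    have hrow := pvRow d (L.getD i "") p 0 (List.replicate p.length 0) (by simp)
      (by intro q _ hq; simp only [List.length_replicate] at hq; simp [hq])
    simp only [Nat.cast_zero, pvMset] at hrow
    rw [hY0, hrow, List.take_zero, List.nil_append]
    rw [List.getElem?_map, List.getElem?_eq_getElem hi]
    simp only [Option.map_some]
    congr 1
    rw [List.getD_eq_getElem L "" hi]
    simp only [pvMset]
  · rw [List.getElem?_eq_none (by rw [houter.1]; omega), List.getElem?_eq_none (by simp only [List.length_map]; omega)]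

-- ---- B side: the inverted index yields the same indicator matrix ----

-- task_mods.getD t [] collects exactly the js of the modules containing t
lemma pvTm_mem (p : List (List String)) (t : String) (j : Int) :
    (j ∈ ((PySem.List.enumerate p 0).foldl (fun tm jm =>
        jm.2.foldl (fun tm task => tm.modify task [] (fun l => l ++ [jm.1])) tm) PySem.Dict.empty).getD t [])
    ↔ ∃ k : Nat, ∃ _ : k < p.length, t ∈ p[k] ∧ j = (k : Int) := by
  have hstep : ∀ (tm : PySem.Dict String (List Int)) (jm : Int × List String),
      jm.2.foldl (fun tm task => tm.modify task [] (fun l => l ++ [jm.1])) tm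
        = (jm.2.map (fun task => (task, jm.1))).foldl (fun tm q => tm.modify q.1 [] (fun l => l ++ [q.2])) tm := by
    intro tm jm
    rw [List.foldl_map]
  have hflat : (PySem.List.enumerate p 0).foldl (fun tm jm =>
        jm.2.foldl (fun tm task => tm.modify task [] (fun l => l ++ [jm.1])) tm) PySem.Dict.empty
      = (((PySem.List.enumerate p 0).flatMap (fun jm => jm.2.map (fun task => (task, jm.1)))).foldl
          (fun tm q => tm.modify q.1 [] (fun l => l ++ [q.2])) PySem.Dict.empty) := by
    rw [List.foldl_flatMap]
    simp only [hstep]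
  rw [hflat, PySem.Dict.getD_foldl_modify_append, PySem.Dict.getD_empty, List.nil_append]
  simp only [List.mem_map, List.mem_filter, List.mem_flatMap, PySem.List.mem_enumerate_iff, beq_iff_eq]
  constructor
  · rintro ⟨q, ⟨⟨jm, ⟨k, hk, rfl⟩, hq⟩, hq1⟩, rfl⟩
    rcases hq with ⟨task, htask, rfl⟩
    obtain rfl : task = t := hq1
    exact ⟨k, hk, htask, by simp⟩
  · rintro ⟨k, hk, ht, rfl⟩
    exact ⟨(t, (0 : Int) + k),
      ⟨⟨((0 : Int) + k, p[k]), ⟨k, hk, rfl⟩, ⟨t, ht, rfl⟩⟩, rfl⟩, by omega⟩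

-- initial cols: every slot is the empty set
lemma pvCols0 (fs : List String) (f : String) :
    ∀ c : PySem.Dict String (PySem.Set Int), c.getD f PySem.Set.empty = PySem.Set.empty →
      (fs.foldl (fun c g => c.insert g PySem.Set.empty) c).getD f PySem.Set.empty = PySem.Set.empty := by
  induction fs with
  | nil => intro c hc; simpa using hc
  | cons g fs ih =>
    intro c hc
    simp only [List.foldl_cons]
    apply ih
    rw [PySem.Dict.getD_insert]
    split <;> [rfl; exact hc]

-- inner cols loop: one (task, files) item unions its task's module indices into each file's slot
lemma pvColsInner (Lidx : List Int) (gs : List String) (f : String) (j : Int) :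
    ∀ c : PySem.Dict String (PySem.Set Int),
      (j ∈ (gs.foldl (fun c g => c.modify g PySem.Set.empty (fun s => PySem.Set.update s Lidx)) c).getD f PySem.Set.empty)
      ↔ j ∈ c.getD f PySem.Set.empty ∨ (f ∈ gs ∧ j ∈ Lidx) := by
  induction gs with
  | nil => intro c; simp
  | cons g gs ih =>
    intro c
    simp only [List.foldl_cons]
    rw [ih]
    rw [PySem.Dict.getD_modify]
    by_cases hfg : f = g
    · rw [if_pos hfg]
      simp only [PySem.Set.mem_update, List.mem_cons, hfg]
      tauto
    · rw [if_neg hfg]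
      simp only [List.mem_cons, hfg, false_or]

-- outer cols loop over the dict items
lemma pvColsOuter (tmsD : String → List Int) (f : String) (j : Int) :
    ∀ (l : List (String × List String)) (c : PySem.Dict String (PySem.Set Int)),
      (j ∈ (l.foldl (fun c tf =>
          tf.2.foldl (fun c g => c.modify g PySem.Set.empty (fun s => PySem.Set.update s (tmsD tf.1))) c) c).getD f PySem.Set.empty)
      ↔ j ∈ c.getD f PySem.Set.empty ∨ ∃ tf ∈ l, f ∈ tf.2 ∧ j ∈ tmsD tf.1 := by
  intro l
  induction l with
  | nil => intro c; simp
  | cons tf l ih =>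
    intro c
    simp only [List.foldl_cons]
    rw [ih, pvColsInner]
    simp only [List.mem_cons]
    constructor
    · rintro ((h | h) | ⟨tf', htf', h⟩)
      · exact Or.inl h
      · exact Or.inr ⟨tf, Or.inl rfl, h⟩
      · exact Or.inr ⟨tf', Or.inr htf', h⟩
    · rintro (h | ⟨tf', (rfl | htf'), h⟩)
      · exact Or.inl (Or.inl h)
      · exact Or.inl (Or.inr h)
      · exact Or.inr ⟨tf', htf', h⟩

-- items of d vs lookups in d (keys unique)
lemma pvItems_bridge (d : PySem.Dict String (List String)) (hnd : d.keys.Nodup)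
    (f : String) (Q : String → Prop) :
    (∃ tf ∈ d.items, f ∈ tf.2 ∧ Q tf.1) ↔ (∃ t, Q t ∧ f ∈ PySem.Dict.getD d t []) := by
  constructor
  · rintro ⟨⟨t, fs⟩, htf, hf, hq⟩
    exact ⟨t, hq, by rw [PySem.Dict.getD_of_mem_items _ htf hnd]; exact hf⟩
  · rintro ⟨t, hq, hf⟩
    rcases hg : d.get? t with _ | v
    · rw [PySem.Dict.getD_of_get?_eq_none _ _ hg] at hf; simp at hf
    · rw [PySem.Dict.getD_of_get?_eq_some _ _ hg] at hf
      exact ⟨(t, v), PySem.Dict.mem_items_of_get?_eq_some (d := d) hg, hf, hq⟩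

-- B's matrix equals the indicator matrix over the sorted file list
lemma pvMainB (d : PySem.Dict String (List String)) (hnd : d.keys.Nodup) (p : List (List String)) :
    ((PySem.List.sorted (PySem.Set.ofList (d.values.flatMap (fun fs => fs))) (fun x => x) false).map (fun f =>
      (PySem.List.pyRange 0 (p.length : Int) 1).map (fun j =>
        if PySem.Set.contains
            ((d.items.foldl (fun c tf =>
                tf.2.foldl (fun c g => c.modify g PySem.Set.empty (fun s => PySem.Set.update s
                  (((PySem.List.enumerate p 0).foldl (fun tm jm =>
                      jm.2.foldl (fun tm task => tm.modify task [] (fun l => l ++ [jm.1])) tm) PySem.Dict.empty).getD tf.1 []))) c)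
              ((PySem.List.sorted (PySem.Set.ofList (d.values.flatMap (fun fs => fs))) (fun x => x) false).foldl
                (fun c f => c.insert f PySem.Set.empty) PySem.Dict.empty)).getD f PySem.Set.empty) j
          then (1 : Int) else 0)))
    = (PySem.List.sorted (PySem.Set.ofList (d.values.flatMap (fun fs => fs))) (fun x => x) false).map
        (fun f => p.map (fun m => if f ∈ pvMset d m then (1 : Int) else 0)) := by
  set L := PySem.List.sorted (PySem.Set.ofList (d.values.flatMap (fun fs => fs))) (fun x => x) false with hLdef
  set tms := (PySem.List.enumerate p 0).foldl (fun tm jm =>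
      jm.2.foldl (fun tm task => tm.modify task [] (fun l => l ++ [jm.1])) tm) PySem.Dict.empty with htms
  set cols := d.items.foldl (fun c tf =>
      tf.2.foldl (fun c g => c.modify g PySem.Set.empty (fun s => PySem.Set.update s (tms.getD tf.1 []))) c)
    (L.foldl (fun c f => c.insert f PySem.Set.empty) PySem.Dict.empty) with hcols
  refine List.map_congr_left (fun f _ => ?_)
  apply List.ext_getElem
  · simp [PySem.List.length_pyRange_one]
  · intro k hk1 hk2
    simp only [List.getElem_map]
    rw [PySem.List.getElem_pyRange_one]
    have hkp : k < p.length := by simpa using hk2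
    have hchar : (((0 : Int) + k) ∈ cols.getD f PySem.Set.empty) ↔ f ∈ pvMset d p[k] := by
      have h1 := pvColsOuter (fun t => tms.getD t []) f ((0 : Int) + k) d.items
        (L.foldl (fun c f => c.insert f PySem.Set.empty) PySem.Dict.empty)
      rw [pvCols0 L f PySem.Dict.empty (PySem.Dict.getD_empty _ _)] at h1
      rw [hcols]
      refine h1.trans ?_
      simp only [PySem.Set.empty, List.not_mem_nil, false_or]
      rw [pvItems_bridge d hnd f (fun t => ((0 : Int) + k) ∈ tms.getD t [])]
      rw [pvMset_mem]
      constructor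
      · rintro ⟨t, htm, hf⟩
        rw [htms, pvTm_mem] at htm
        rcases htm with ⟨k', hk', ht, hkk⟩
        have : k' = k := by omega
        subst this
        exact ⟨t, ht, hf⟩
      · rintro ⟨t, ht, hf⟩
        exact ⟨t, by rw [htms, pvTm_mem]; exact ⟨k, hkp, ht, by simp⟩, hf⟩
    by_cases hm : f ∈ pvMset d p[k]
    · rw [if_pos (by rw [PySem.Set.contains_iff]; exact hchar.mpr hm), if_pos hm]
    · rw [if_neg (by rw [PySem.Set.contains_iff]; exact fun h => hm (hchar.mp h)), if_neg hm]

-- ===== VERDICT (by name: the statement is the Claim_ definition above) =====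
theorem create_matrix_Y_spec : Claim_equal_create_matrix_Y := by
  intro tasks_files partition _
  show create_matrix_Y tasks_files partition = create_matrix_Y_alt tasks_files partition
  exact Prod.ext
    ((pvMainA (PySem.Dict.ofList tasks_files) partition).trans
      (pvMainB (PySem.Dict.ofList tasks_files) (PySem.Dict.nodup_keys_ofList tasks_files) partition).symm)
    rfl
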